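-- pv_equiv track=rewrite | github.com/BlackRoadCode/PersonalProjects | training-codewars/Python/013-password_maker.py | make_password
-- ===== SOURCE A (Python) =====
-- def make_password(phrase):
--     replace_dict = { 'i':'1', 'I':'1', 'o':'0', 'O':'0', 's':'5', 'S':'5' }
--     pass_arr = []
--     arr_phr = phrase.split()
--
--     for word in arr_phr:
--         if ( word[0] in replace_dict.keys() ):
--             pass_arr.append( replace_dict[word[0]] )
--         else:
--             pass_arr.append( word[0] )
--
--     return ''.join( pass_arr )
-- ===== SOURCE B (Python) =====
-- def make_password(phrase):
--     out = []
--     in_word = False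
--     for ch in phrase:
--         sp = ch in ' \t\n\r\x0b\x0c'
--         if not sp and not in_word:
--             out.append('1' if ch in 'iI' else '0' if ch in 'oO' else '5' if ch in 'sS' else ch)
--         in_word = not sp
--     return ''.join(out)
-- ===== Notes on version B (the rewrite author's own statement) =====
-- stated objective: alternative
-- what changed: Replaces split()-into-words plus a dict lookup per word by a single character-level state machine over the raw string: a word-boundary flag emits each character that follows whitespace, substituted by chained conditionals, so no word list and no dict are ever built.
import Mathlib
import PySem

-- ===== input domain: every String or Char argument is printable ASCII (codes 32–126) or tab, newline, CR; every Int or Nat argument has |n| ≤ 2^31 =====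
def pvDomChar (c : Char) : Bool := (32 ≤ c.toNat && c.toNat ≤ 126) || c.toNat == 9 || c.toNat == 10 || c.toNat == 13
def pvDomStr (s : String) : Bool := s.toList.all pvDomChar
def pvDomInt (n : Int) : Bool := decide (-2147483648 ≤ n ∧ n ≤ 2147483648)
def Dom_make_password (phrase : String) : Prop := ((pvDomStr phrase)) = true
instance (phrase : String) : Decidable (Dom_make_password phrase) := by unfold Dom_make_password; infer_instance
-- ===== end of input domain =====

-- B replaces A's split()-into-words-plus-dict-lookup by a one-pass character state
-- machine over the raw string (a word-boundary flag, chained-conditional substitution).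

-- ===== PORT A =====
-- word[0] is a 1-char Python string, represented by a Char (exact: the dict's keys and
-- values are all 1-char strings). split() never yields an empty word, so the head? = none
-- branch (Python's IndexError) is unreachable; the fold skips it.
def make_password (phrase : String) : String :=
  let replace_dict : PySem.Dict Char Char :=
    PySem.Dict.ofList [('i','1'), ('I','1'), ('o','0'), ('O','0'), ('s','5'), ('S','5')]
  let arr_phr := PySem.Str.split₀ phrase
  let pass_arr : List Char := arr_phr.foldl (fun acc word =>
    match word.toList.head? with
    | some c => if replace_dict.contains c then acc ++ [replace_dict.getD c c] else acc ++ [c]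
    | none => acc) []
  String.ofList pass_arr

-- ===== PORT B =====
-- Source B's chained conditional expression ('1' if ch in 'iI' else …)
def pvSub (ch : Char) : Char :=
  if ch = 'i' ∨ ch = 'I' then '1'
  else if ch = 'o' ∨ ch = 'O' then '0'
  else if ch = 's' ∨ ch = 'S' then '5'
  else ch

-- Source B's whitespace test: ch in ' \t\n\r\x0b\x0c'
def pvSp (ch : Char) : Bool :=
  [' ', '\t', '\n', '\r', Char.ofNat 11, Char.ofNat 12].contains ch

def make_password_alt (phrase : String) : String :=
  let step : (List Char × Bool) → Char → (List Char × Bool) := fun st ch =>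
    let sp := pvSp ch
    (if !sp && !st.2 then st.1 ++ [pvSub ch] else st.1, !sp)
  String.ofList (phrase.toList.foldl step ([], false)).1

-- ===== PRECONDITION & SPEC =====
def Spec_make_password (phrase : String) (out : String) : Prop := out = make_password_alt phrase
instance (phrase : String) (out : String) : Decidable (Spec_make_password phrase out) := by unfold Spec_make_password; infer_instance

-- ===== CLAIM (what is proved, stated in full; the proofs are below) =====
def Claim_equal_make_password : Prop := ∀ (phrase : String), Dom_make_password phrase → Spec_make_password phrase (make_password phrase)

-- ===== LEMMAS AND PROOFS =====

-- the first characters of the words of cs, computed by a direct scan (proof-only device)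
def pvScanH : List Char → Bool → List Char
  | [], _ => []
  | c :: r, inw =>
    if PySem.Chars.isspace c then pvScanH r false
    else if inw then pvScanH r true else c :: pvScanH r true

def pvHeads (ws : List (List Char)) : List Char := ws.filterMap List.head?

def pvTable : PySem.Dict Char Char :=
  PySem.Dict.ofList [('i','1'), ('I','1'), ('o','0'), ('O','0'), ('s','5'), ('S','5')]

theorem pv_char_eq_iff (a b : Char) : (a = b) ↔ (a.toNat = b.toNat) :=
  ⟨fun h => by rw [h], fun h => Char.ext (by exact UInt32.toNat_inj.mp h)⟩

-- A's dict step equals B's chained conditional, pointwise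
theorem pv_step_eq (c : Char) :
    (if pvTable.contains c then pvTable.getD c c else c) = pvSub c := by
  by_cases h1 : c = 'i' <;> by_cases h2 : c = 'I' <;> by_cases h3 : c = 'o' <;>
    by_cases h4 : c = 'O' <;> by_cases h5 : c = 's' <;> by_cases h6 : c = 'S' <;>
    simp_all [pvSub, pvTable, PySem.Dict.ofList, PySem.Dict.update,
      PySem.Dict.contains_insert, PySem.Dict.contains_empty, PySem.Dict.getD_insert]

-- heads of split₀.go, characterised by the scan
theorem pv_go_heads (cs : List Char) (cur : List Char) (acc : List (List Char)) :
    pvHeads (PySem.Chars.split₀.go cs cur acc)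
      = pvHeads acc.reverse ++ cur.getLast?.toList ++ pvScanH cs (!cur.isEmpty) := by
  induction cs generalizing cur acc with
  | nil =>
    cases cur with
    | nil => simp [PySem.Chars.split₀.go, pvScanH, pvHeads]
    | cons d ds =>
      simp [PySem.Chars.split₀.go, pvScanH, pvHeads, List.filterMap_append,
        List.head?_reverse, List.getLast?_cons]
  | cons c rest ih =>
    by_cases hs : PySem.Chars.isspace c = true
    · cases cur with
      | nil => simp [PySem.Chars.split₀.go, hs, pvScanH, ih]
      | cons d ds =>
        rw [show PySem.Chars.split₀.go (c :: rest) (d :: ds) acc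
            = PySem.Chars.split₀.go rest [] ((d :: ds).reverse :: acc) by
          simp [PySem.Chars.split₀.go, hs]]
        rw [ih]
        simp [pvHeads, pvScanH, hs, List.filterMap_append, List.head?_reverse,
          List.getLast?_cons]
    · rw [show PySem.Chars.split₀.go (c :: rest) cur acc
          = PySem.Chars.split₀.go rest (c :: cur) acc by
        simp [PySem.Chars.split₀.go, hs]]
      rw [ih]
      cases cur with
      | nil => simp [pvScanH, hs]
      | cons d ds => simp [pvScanH, hs, List.getLast?_cons_cons]

-- A's word fold, in terms of the heads
theorem pv_foldl_eq (ws : List String) (acc : List Char) :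
    ws.foldl (fun acc word =>
      match word.toList.head? with
      | some c => if pvTable.contains c then acc ++ [pvTable.getD c c] else acc ++ [c]
      | none => acc) acc
    = acc ++ (pvHeads (ws.map String.toList)).map
        (fun c => if pvTable.contains c then pvTable.getD c c else c) := by
  induction ws generalizing acc with
  | nil => simp [pvHeads]
  | cons w ws ih =>
    rw [List.foldl_cons, ih]
    cases h : w.toList.head? with
    | none => simp [pvHeads, h]
    | some c =>
      by_cases hb : pvTable.contains c = true <;> simp [pvHeads, h, hb]

-- on Dom characters, Source B's membership test agrees with Python's isspace
theorem pv_sp_eq (c : Char) (h : pvDomChar c = true) : pvSp c = PySem.Chars.isspace c := by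
  simp only [pvDomChar, Bool.or_eq_true, Bool.and_eq_true, decide_eq_true_eq, beq_iff_eq] at h
  rw [Bool.eq_iff_iff]
  simp only [pvSp, PySem.Chars.isspace, List.contains_cons, List.contains_nil, beq_iff_eq,
    Bool.or_eq_true, Bool.and_eq_true, decide_eq_true_eq, pv_char_eq_iff, Bool.false_eq_true,
    or_false]
  have e1 : (' ').toNat = 32 := rfl
  have e2 : ('\t').toNat = 9 := rfl
  have e3 : ('\n').toNat = 10 := rfl
  have e4 : ('\x0d').toNat = 13 := rfl
  have e5 : (Char.ofNat 11).toNat = 11 := rfl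
  have e6 : (Char.ofNat 12).toNat = 12 := rfl
  rw [e1, e2, e3, e4, e5, e6]
  omega

-- B's fold, characterised by the scan (under Dom)
theorem pv_foldB (cs : List Char) (h : cs.all pvDomChar = true) (out : List Char) (inw : Bool) :
    (cs.foldl (fun st ch =>
        (if !(pvSp ch) && !st.2 then st.1 ++ [pvSub ch] else st.1, !(pvSp ch))) (out, inw)).1
      = out ++ (pvScanH cs inw).map pvSub := by
  induction cs generalizing out inw with
  | nil => simp [pvScanH]
  | cons c rest ih =>
    simp only [List.all_cons, Bool.and_eq_true] at h
    rw [List.foldl_cons, ih h.2]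
    by_cases hs : PySem.Chars.isspace c = true
    · have hps : pvSp c = true := by rw [pv_sp_eq c h.1]; exact hs
      simp [hps, pvScanH, hs]
    · have hps : pvSp c = false := by rw [pv_sp_eq c h.1]; simpa using hs
      cases inw <;> simp [hps, pvScanH, hs]

-- ===== VERDICT (by name: the statement is the Claim_ definition above) =====
theorem make_password_spec : Claim_equal_make_password := by
  intro phrase hdom
  show make_password phrase = make_password_alt phrase
  have hall : phrase.toList.all pvDomChar = true := hdom
  simp only [make_password, make_password_alt]
  rw [show PySem.Dict.ofList [('i','1'), ('I','1'), ('o','0'), ('O','0'), ('s','5'), ('S','5')]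
      = pvTable from rfl, pv_foldl_eq, pv_foldB phrase.toList hall]
  have hsplit : (PySem.Str.split₀ phrase).map String.toList
      = PySem.Chars.split₀ phrase.toList := by
    simp [PySem.Str.split₀, List.map_map, Function.comp_def]
  rw [hsplit, show PySem.Chars.split₀ phrase.toList
      = PySem.Chars.split₀.go phrase.toList [] [] from rfl, pv_go_heads]
  simp [pvHeads, List.map_congr_left (fun c _ => pv_step_eq c)]
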